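-- pv_equiv track=rewrite | github.com/remorses/skema-api-mock | mock_api/__init__.py | parametrize_urls
-- ===== SOURCE A (Python) =====
-- from functools import reduce
--
-- def parametrize_urls(urls):
--     assert urls
--     assert len(set([len(url.split('/')) for url in urls])) == 1
--     parts = urls[0].split('/')
--     def reducer(acc, url):
--         parts = url.split('/')
--         return [x if x == p else False for x, p in zip(acc, parts)]
--     difference = reduce(reducer, urls, parts)
--     if False in difference:
--         parts[difference.index(False)] = '{}'
--     return '/'.join(parts)
-- ===== SOURCE B (Python) =====
-- def parametrize_urls(urls):
--     assert urls
--     seglists = [url.split('/') for url in urls]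
--     assert len(set([len(s) for s in seglists])) == 1
--     parts = list(seglists[0])
--     for i in range(len(parts)):
--         if any(s[i] != parts[i] for s in seglists):
--             parts[i] = '{}'
--             break
--     return '/'.join(parts)
-- ===== Notes on version B (the rewrite author's own statement) =====
-- stated objective: simpler
-- what changed: Replaces the row-wise reduce (building a mixed str/False accumulator list, then searching it with 'in' and .index) by a column-major scan that finds the first differing column directly with an early break and sets it to '{}'.
import Mathlib
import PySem

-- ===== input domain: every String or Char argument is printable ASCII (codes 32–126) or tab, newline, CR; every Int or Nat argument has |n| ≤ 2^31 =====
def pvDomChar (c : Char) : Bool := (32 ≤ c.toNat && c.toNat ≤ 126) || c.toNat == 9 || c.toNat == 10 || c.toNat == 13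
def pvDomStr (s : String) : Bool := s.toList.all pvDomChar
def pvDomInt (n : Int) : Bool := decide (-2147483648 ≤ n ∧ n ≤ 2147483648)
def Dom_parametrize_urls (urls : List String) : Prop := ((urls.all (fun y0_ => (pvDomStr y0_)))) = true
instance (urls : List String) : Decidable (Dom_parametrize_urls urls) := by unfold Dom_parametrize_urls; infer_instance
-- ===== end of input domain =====

-- B replaces A's row-wise reduce (mixed str/False accumulator, then 'in' + .index search) by a
-- column-major scan with an early break that writes '{}' at the first differing column (simpler).

-- shared primitive: url.split('/') — '/' is a nonempty separator, so split? is always `some`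
def pvSplit (u : String) : List String := (PySem.Str.split? u "/").getD []

-- ===== PORT A =====
-- reducer(acc, url): [x if x == p else False for x, p in zip(acc, url.split('/'))]
-- (False is represented by `none`, a kept string x by `some x`)
def pvReducer (acc : List (Option String)) (url : String) : List (Option String) :=
  List.zipWith (fun x p => match x with
    | some v => if v = p then some v else none
    | none => none) acc (pvSplit url)

def parametrize_urls (urls : List String) : String :=
  -- the two asserts raise outside Pre_; inside Pre_ they pass
  let parts := pvSplit (urls.headD "")                         -- parts = urls[0].split('/')
  let difference := urls.foldl pvReducer (parts.map some)      -- reduce(reducer, urls, parts)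
  let parts := if none ∈ difference
    then parts.set (difference.idxOf none) "{}"                -- parts[difference.index(False)] = '{}'
    else parts
  PySem.Str.join "/" parts                                     -- '/'.join(parts)

-- ===== PORT B =====
-- for i in range(len(parts)): if any(s[i] != parts[i] for s in seglists): parts[i] = '{}'; break
def pvAltLoop (seglists : List (List String)) (parts : List String) (i : Nat) : List String :=
  if i < parts.length then
    if seglists.any (fun s => s.getD i "" ≠ parts.getD i "") then parts.set i "{}"
    else pvAltLoop seglists parts (i + 1)
  else parts
termination_by parts.length - i

def parametrize_urls_alt (urls : List String) : String :=
  let seglists := urls.map pvSplit                             -- [url.split('/') for url in urls]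
  let parts := seglists.headD []                               -- parts = list(seglists[0])
  PySem.Str.join "/" (pvAltLoop seglists parts 0)

-- ===== PRECONDITION & SPEC =====
-- Pre_: the two asserts of A (and of B) must pass — urls nonempty, all URLs split into equally many segments
def Pre_parametrize_urls (urls : List String) : Prop :=
  urls ≠ [] ∧ ∀ u ∈ urls, (pvSplit u).length = (pvSplit (urls.headD "")).length
instance (urls : List String) : Decidable (Pre_parametrize_urls urls) := by unfold Pre_parametrize_urls; infer_instance
def pvWitness_parametrize_urls : List String := ["a/b/c", "a/x/c"]

def Spec_parametrize_urls (urls : List String) (out : String) : Prop := out = parametrize_urls_alt urls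
instance (urls : List String) (out : String) : Decidable (Spec_parametrize_urls urls out) := by unfold Spec_parametrize_urls; infer_instance

-- ===== CLAIM (what is proved, stated in full; the proofs are below) =====
def Claim_equal_parametrize_urls : Prop := ∀ (urls : List String), Dom_parametrize_urls urls → Pre_parametrize_urls urls → Spec_parametrize_urls urls (parametrize_urls urls)

-- ===== LEMMAS AND PROOFS =====

-- the scalar step of pvReducer at one column
def pvG (x : Option String) (p : String) : Option String :=
  match x with
  | some v => if v = p then some v else none
  | none => none

theorem pvReducer_length (acc : List (Option String)) (u : String)
    (h : (pvSplit u).length = acc.length) : (pvReducer acc u).length = acc.length := by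
  simp [pvReducer, h]

theorem pvFoldl_length (ls : List String) (acc : List (Option String))
    (h : ∀ u ∈ ls, (pvSplit u).length = acc.length) :
    (ls.foldl pvReducer acc).length = acc.length := by
  induction ls generalizing acc with
  | nil => rfl
  | cons u t ih =>
      have hu : (pvSplit u).length = acc.length := h u (by simp)
      have hlen := pvReducer_length acc u hu
      simpa [List.foldl_cons, hlen] using ih (pvReducer acc u) (fun v hv => by
        rw [hlen]; exact h v (by simp [hv]))

theorem pvFoldl_get (ls : List String) (acc : List (Option String)) (i : Nat)
    (h : ∀ u ∈ ls, (pvSplit u).length = acc.length) (hi : i < acc.length) :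
    (ls.foldl pvReducer acc)[i]? =
      some (ls.foldl (fun x u => pvG x ((pvSplit u).getD i "")) (acc.getD i none)) := by
  induction ls generalizing acc with
  | nil => simp [List.getD, List.getElem?_eq_getElem hi]
  | cons u t ih =>
      have hu : (pvSplit u).length = acc.length := h u (by simp)
      have hlen := pvReducer_length acc u hu
      have hstep : (pvReducer acc u)[i]? = some (pvG (acc.getD i none) ((pvSplit u).getD i "")) := by
        have hi' : i < (pvSplit u).length := by omega
        simp [pvReducer, List.getElem?_zipWith, List.getElem?_eq_getElem hi,
          List.getElem?_eq_getElem hi', List.getD, pvG]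
      have := ih (pvReducer acc u) (fun v hv => by rw [hlen]; exact h v (by simp [hv])) (by omega)
      rw [List.foldl_cons, this]
      have : (pvReducer acc u).getD i none = pvG (acc.getD i none) ((pvSplit u).getD i "") := by
        simp [List.getD, hstep]
      rw [this]
      rfl

theorem pvScalar_none (ls : List String) (f : String → String) :
    ls.foldl (fun x u => pvG x (f u)) none = none := by
  induction ls with
  | nil => rfl
  | cons u t ih => simpa [pvG] using ih

theorem pvScalar_fold (ls : List String) (v : String) (f : String → String) :
    ls.foldl (fun x u => pvG x (f u)) (some v) =
      if ls.all (fun u => f u == v) then some v else none := by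
  induction ls with
  | nil => simp
  | cons u t ih =>
      rw [List.foldl_cons]
      by_cases h : f u = v
      · have hg : pvG (some v) (f u) = some v := by
          unfold pvG; simp only []; rw [if_pos h.symm]
        rw [hg, ih]
        simp [List.all_cons, beq_iff_eq, h]
      · have hg : pvG (some v) (f u) = none := by
          unfold pvG; simp only []; rw [if_neg (fun hv => h hv.symm)]
        rw [hg, pvScalar_none]
        simp [List.all_cons, beq_iff_eq, h]

-- the first-differing-column predicate both programs search for
def pvQ (seglists : List (List String)) (parts : List String) (i : Nat) : Bool :=
  seglists.any (fun s => s.getD i "" ≠ parts.getD i "")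

theorem pvDiff_eq_map (urls : List String) (parts : List String)
    (hlen : ∀ u ∈ urls, (pvSplit u).length = parts.length) :
    urls.foldl pvReducer (parts.map some) =
      (List.range parts.length).map
        (fun i => if pvQ (urls.map pvSplit) parts i then none else some (parts.getD i "")) := by
  have hlen0 : ∀ u ∈ urls, (pvSplit u).length = (parts.map some).length := by
    simpa using hlen
  apply List.ext_getElem?
  intro i
  by_cases hi : i < parts.length
  · rw [pvFoldl_get urls (parts.map some) i hlen0 (by simpa using hi)]
    have hrange : ((List.range parts.length).map
        (fun i => if pvQ (urls.map pvSplit) parts i then none else some (parts.getD i "")))[i]? =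
        some (if pvQ (urls.map pvSplit) parts i then none else some (parts.getD i "")) := by
      simp [List.getElem?_map, List.getElem?_range hi]
    rw [hrange]
    have hacc : (parts.map some).getD i none = some (parts.getD i "") := by
      simp [List.getD, List.getElem?_map, List.getElem?_eq_getElem hi]
    rw [hacc, pvScalar_fold]
    have hpq : pvQ (urls.map pvSplit) parts i
        = urls.any (fun u => decide ¬((pvSplit u).getD i "" = parts.getD i "")) := by
      rw [pvQ, List.any_map]; rfl
    congr 1
    rw [hpq]
    cases hall : urls.all (fun u => (pvSplit u).getD i "" == parts.getD i "") with
    | true =>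
        have hany : (urls.any fun u => decide ¬((pvSplit u).getD i "" = parts.getD i "")) = false := by
          rw [List.any_eq_false]
          intro u hu
          have h := List.all_eq_true.mp hall u hu
          rw [beq_iff_eq] at h
          simp only [decide_eq_true_eq]
          exact not_not_intro h
        rw [hany]
        simp
    | false =>
        have hany : (urls.any fun u => decide ¬((pvSplit u).getD i "" = parts.getD i "")) = true := by
          obtain ⟨u, hu, hne⟩ := List.all_eq_false.mp hall
          simp only [beq_iff_eq] at hne
          exact List.any_eq_true.mpr ⟨u, hu, decide_eq_true hne⟩
        rw [hany]
        simp
  · have h1 : (urls.foldl pvReducer (parts.map some)).length = parts.length := by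
      simpa using pvFoldl_length urls (parts.map some) hlen0
    rw [List.getElem?_eq_none (by omega), List.getElem?_eq_none (by simpa using (by omega : parts.length ≤ i))]

-- A-side: membership/index of `none` in the mapped-range list against find? over the range
theorem pvRange'_find_ge (q : Nat → Bool) (s m k : Nat)
    (h : (List.range' s m).find? q = some k) : s ≤ k := by
  have := List.find?_some h
  have hk := List.mem_of_find?_eq_some h
  have := List.mem_range'_1.mp hk
  omega

theorem pvMap_mem_none (l : List Nat) (q : Nat → Bool) (f : Nat → String) :
    (none ∈ l.map (fun i => if q i then none else some (f i))) ↔ (l.find? q).isSome := by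
  induction l with
  | nil => simp
  | cons a t ih =>
      by_cases hq : q a
      · simp [List.find?_cons, hq]
      · simp [List.find?_cons, hq, ih]

theorem pvMap_idxOf (q : Nat → Bool) (f : Nat → String) :
    ∀ (s m k : Nat), (List.range' s m).find? q = some k →
    ((List.range' s m).map (fun i => if q i then none else some (f i))).idxOf none = k - s := by
  intro s m
  induction m generalizing s with
  | zero => intro k h; simp at h
  | succ m ih =>
      intro k h
      rw [List.range'_succ] at h ⊢
      by_cases hq : q s
      · rw [List.find?_cons_of_pos hq] at h
        have hk : k = s := by exact Option.some.inj h.symm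
        subst hk
        simp [List.idxOf_cons, hq]
      · rw [List.find?_cons_of_neg (by simp [hq])] at h
        have hk := pvRange'_find_ge q (s+1) m k h
        have ht := ih (s+1) k h
        rw [List.map_cons, if_neg hq, List.idxOf_cons]
        have hbeq : ((some (f s) : Option String) == none) = false := by simp
        rw [hbeq, cond_false, ht]
        omega

-- B-side: the loop finds the first column ≥ i satisfying pvQ
theorem pvAltLoop_spec (seglists : List (List String)) (parts : List String) :
    ∀ i, pvAltLoop seglists parts i =
      match (List.range' i (parts.length - i)).find? (pvQ seglists parts) with
      | some k => parts.set k "{}"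
      | none => parts := by
  intro i
  induction hm : parts.length - i generalizing i with
  | zero =>
      rw [pvAltLoop]
      simp [show ¬ i < parts.length by omega, hm]
  | succ m ih =>
      rw [pvAltLoop]
      have hi : i < parts.length := by omega
      rw [if_pos hi, List.range'_succ]
      by_cases hq : pvQ seglists parts i
      · rw [List.find?_cons_of_pos hq]
        have hc : (seglists.any fun s => decide (s.getD i "" ≠ parts.getD i "")) = true := hq
        rw [hc, if_pos rfl]
      · rw [List.find?_cons_of_neg (by simp [hq])]
        have hc : (seglists.any fun s => decide (s.getD i "" ≠ parts.getD i "")) = false :=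
          Bool.eq_false_iff.mpr hq
        rw [hc, if_neg (by simp)]
        exact ih (i+1) (by omega)

-- ===== VERDICT (by name: the statement is the Claim_ definition above) =====
theorem parametrize_urls_spec : Claim_equal_parametrize_urls := by
  intro urls _ hpre
  obtain ⟨hne, hlen⟩ := hpre
  unfold Spec_parametrize_urls parametrize_urls parametrize_urls_alt
  simp only []
  set parts := pvSplit (urls.headD "") with hparts
  have hhead : (urls.map pvSplit).headD [] = parts := by
    cases urls with
    | nil => exact absurd rfl hne
    | cons u t => simp [hparts]
  rw [hhead]
  congr 1
  -- A's post-reduce list, characterised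
  rw [pvDiff_eq_map urls parts (by simpa [hparts] using hlen)]
  rw [pvAltLoop_spec]
  set q := pvQ (urls.map pvSplit) parts with hq
  rw [List.range_eq_range']
  have h0 : parts.length - 0 = parts.length := by omega
  rw [h0]
  cases hfind : (List.range' 0 parts.length).find? q with
  | none =>
      have hnm : ¬ (none ∈ (List.range' 0 parts.length).map
          (fun i => if q i then none else some (parts.getD i ""))) := by
        rw [pvMap_mem_none, hfind]; simp
      rw [if_neg hnm]
  | some k =>
      have hmem : none ∈ (List.range' 0 parts.length).map
          (fun i => if q i then none else some (parts.getD i "")) := by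
        rw [pvMap_mem_none, hfind]; simp
      rw [if_pos hmem, pvMap_idxOf q (fun i => parts.getD i "") 0 parts.length k hfind, Nat.sub_zero]
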